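-- pv_equiv track=rewrite | github.com/ZSWatch/ZSWatch | zswatch-server/server/coredump.py | _parse_gdb_output
-- ===== SOURCE A (Python) =====
-- from typing import Optional
--
-- def _parse_gdb_output(gdb_output: str) -> tuple[Optional[str], Optional[str]]:
--     """
--     Split the GDB stdout into a backtrace section and registers section.
--     Returns (backtrace_str, registers_str).
--     """
--     lines = gdb_output.splitlines()
--     bt_lines = []
--     reg_lines = []
--     in_bt = False
--     in_regs = False
--
--     for line in lines:
--         stripped = line.strip()
--         # Backtrace starts with "#0 "
--         if stripped.startswith("#0 "):
--             in_bt = True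
--         if in_bt:
--             # Backtrace ends when we hit a blank line or register dump starts
--             if stripped.startswith("r0 ") or stripped.startswith("pc "):
--                 in_bt = False
--                 in_regs = True
--             else:
--                 bt_lines.append(line)
--         elif in_regs:
--             reg_lines.append(line)
--
--     backtrace = "\n".join(bt_lines).strip() or None
--     registers = "\n".join(reg_lines).strip() or None
--     return backtrace, registers
-- ===== SOURCE B (Python) =====
-- from typing import Optional
--
--
-- def _parse_gdb_output(gdb_output: str) -> tuple[Optional[str], Optional[str]]:
--     """
--     Split the GDB stdout into a backtrace section and registers section.
--     Returns (backtrace_str, registers_str).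
--     """
--     lines = gdb_output.splitlines()
--     # drop everything before the first backtrace line ("#0 ...")
--     while lines and not lines[0].strip().startswith("#0 "):
--         lines.pop(0)
--     # cut the tail into segments, each beginning at a "#0 " line
--     segments = []
--     for line in lines:
--         if line.strip().startswith("#0 ") or not segments:
--             segments.append([line])
--         else:
--             segments[-1].append(line)
--     bt_lines = []
--     reg_lines = []
--     for seg in segments:
--         k = 0
--         while k < len(seg) and not seg[k].strip().startswith(("r0 ", "pc ")):
--             k += 1
--         bt_lines += seg[:k]       # backtrace part of the segment
--         reg_lines += seg[k + 1:]  # register part, skipping the marker line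
--     backtrace = "\n".join(bt_lines).strip() or None
--     registers = "\n".join(reg_lines).strip() or None
--     return backtrace, registers
-- ===== Notes on version B (the rewrite author's own statement) =====
-- stated objective: alternative
-- what changed: Replaces the flag-driven state-machine pass with a slicing decomposition: drop the lines before the first backtrace-start line, cut the tail into segments beginning at each backtrace-start line, and split each segment at its first register-marker line into a backtrace part and a register part (marker line skipped).
import Mathlib
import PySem

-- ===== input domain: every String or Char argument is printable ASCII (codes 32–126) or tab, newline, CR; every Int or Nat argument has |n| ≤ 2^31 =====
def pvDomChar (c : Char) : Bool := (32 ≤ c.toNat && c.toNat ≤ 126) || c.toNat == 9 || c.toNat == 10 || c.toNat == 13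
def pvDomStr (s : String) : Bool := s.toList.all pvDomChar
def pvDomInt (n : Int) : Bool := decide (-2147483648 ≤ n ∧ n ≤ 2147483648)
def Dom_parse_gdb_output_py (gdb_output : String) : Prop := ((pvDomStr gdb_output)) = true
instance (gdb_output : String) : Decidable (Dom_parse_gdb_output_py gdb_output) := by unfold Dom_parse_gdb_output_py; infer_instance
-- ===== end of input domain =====

-- B replaces A's flag-driven single pass by a slicing decomposition (drop prefix, cut into
-- '#0 '-segments, split each segment at its first register marker); objective: alternative, same cost.

-- shared tests (both Pythons compute line.strip().startswith(...) with these literals)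
def pvIsBt (l : String) : Bool := PySem.Str.startswith (PySem.Str.strip l) "#0 "
def pvIsMark (l : String) : Bool :=
  PySem.Str.startswith (PySem.Str.strip l) "r0 " || PySem.Str.startswith (PySem.Str.strip l) "pc "

-- shared ending: "\n".join(..).strip() or None (textually identical in both Pythons)
def pvFinish (bt reg : List String) : Option String × Option String :=
  let backtrace := PySem.Str.strip (PySem.Str.join "\n" bt)
  let registers := PySem.Str.strip (PySem.Str.join "\n" reg)
  ((if backtrace = "" then none else some backtrace),
   (if registers = "" then none else some registers))

-- ===== PORT A =====
-- loop body of A: state (bt_lines, reg_lines, in_bt, in_regs)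
def pvStepA (st : List String × List String × Bool × Bool) (line : String) :
    List String × List String × Bool × Bool :=
  let in_bt := if pvIsBt line then true else st.2.2.1
  if in_bt then
    if pvIsMark line then (st.1, st.2.1, false, true)
    else (st.1 ++ [line], st.2.1, in_bt, st.2.2.2)
  else if st.2.2.2 then (st.1, st.2.1 ++ [line], in_bt, st.2.2.2)
  else (st.1, st.2.1, in_bt, st.2.2.2)

def parse_gdb_output_py (gdb_output : String) : Option String × Option String :=
  let lines := PySem.Str.splitlines gdb_output
  let st := lines.foldl pvStepA ([], [], false, false)
  pvFinish st.1 st.2.1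

-- ===== PORT B =====
-- segments[-1].append(line) of Source B
def pvAppendLast : List (List String) → String → List (List String)
  | [], l => [[l]]
  | [s], l => [s ++ [l]]
  | s :: t :: r, l => s :: pvAppendLast (t :: r) l

-- loop body of Source B's segmentation loop
def pvAddLine (segs : List (List String)) (line : String) : List (List String) :=
  if pvIsBt line || segs.isEmpty then segs ++ [[line]] else pvAppendLast segs line

-- Source B's per-segment split: k = index of first marker (while loop), seg[:k] and seg[k+1:]
def pvSegStep (p : List String × List String) (seg : List String) : List String × List String :=
  let k := (seg.takeWhile (fun l => !(pvIsMark l))).length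
  (p.1 ++ seg.take k, p.2 ++ seg.drop (k + 1))

def parse_gdb_output_py_alt (gdb_output : String) : Option String × Option String :=
  -- the while/pop loop drops the longest prefix of non-'#0 ' lines
  let lines := (PySem.Str.splitlines gdb_output).dropWhile (fun l => !(pvIsBt l))
  let segments := lines.foldl pvAddLine []
  let p := segments.foldl pvSegStep ([], [])
  pvFinish p.1 p.2

-- ===== PRECONDITION & SPEC =====
def Spec_parse_gdb_output_py (gdb_output : String) (out : Option String × Option String) : Prop := out = parse_gdb_output_py_alt gdb_output
instance (gdb_output : String) (out : Option String × Option String) : Decidable (Spec_parse_gdb_output_py gdb_output out) := by unfold Spec_parse_gdb_output_py; infer_instance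

-- ===== CLAIM (what is proved, stated in full; the proofs are below) =====
def Claim_equal_parse_gdb_output_py : Prop := ∀ (gdb_output : String), Dom_parse_gdb_output_py gdb_output → Spec_parse_gdb_output_py gdb_output (parse_gdb_output_py gdb_output)

-- ===== LEMMAS AND PROOFS =====

-- reference state machine: pvRun b ls = (bt, reg) produced by A's loop from a state with
-- in_bt = b, once the backtrace region has been entered (in_bt || in_regs)
def pvRun : Bool → List String → List String × List String
  | _, [] => ([], [])
  | b, l :: ls =>
    if b || pvIsBt l then
      if pvIsMark l then pvRun false ls
      else ((l :: (pvRun true ls).1), (pvRun true ls).2)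
    else ((pvRun false ls).1, l :: (pvRun false ls).2)

-- reference segmentation: cut at every '#0 ' line (first line assumed to start a segment)
def pvSegs : List String → List (List String)
  | [] => []
  | l :: ls =>
    (l :: ls.takeWhile (fun x => !(pvIsBt x))) :: pvSegs (ls.dropWhile (fun x => !(pvIsBt x)))
  termination_by ls => ls.length
  decreasing_by
    simpa using Nat.lt_succ_of_le (List.length_dropWhile_le _ _)

lemma pvFold_run (ls : List String) : ∀ (bt reg : List String) (b r : Bool), b = true ∨ r = true →
    (List.foldl pvStepA (bt, reg, b, r) ls).1 = bt ++ (pvRun b ls).1 ∧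
    (List.foldl pvStepA (bt, reg, b, r) ls).2.1 = reg ++ (pvRun b ls).2 := by
  induction ls with
  | nil => intro bt reg b r _; simp [pvRun]
  | cons l ls ih =>
    intro bt reg b r hbr
    by_cases hb : (b || pvIsBt l) = true
    · by_cases hm : pvIsMark l = true
      · have h := ih bt reg false true (Or.inr rfl)
        simp only [List.foldl_cons, pvStepA, hm]
        rcases Bool.or_eq_true .. |>.mp hb with h1 | h1
        · simp only [pvRun, h1, hm, Bool.true_or, if_true]
          cases hbt : pvIsBt l <;> simp [hbt, h1, h] <;> simpa [h1, hbt] using h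
        · simp only [pvRun, h1, hm, Bool.or_true, if_true, if_pos rfl]
          cases b <;> simp [h1, h] <;> simpa [h1] using h
      · have h := ih (bt ++ [l]) reg true r (Or.inl rfl)
        simp only [List.foldl_cons, pvStepA]
        rcases Bool.or_eq_true .. |>.mp hb with h1 | h1
        · simp only [pvRun, h1, hm, Bool.true_or, if_true, Bool.not_eq_true] at *
          cases hbt : pvIsBt l <;> simp [hbt, h1, hm, h]
        · simp only [pvRun, h1, hm, Bool.or_true, if_true, Bool.not_eq_true] at *
          cases b <;> simp [h1, hm, h]
    · -- b = false and ¬ pvIsBt l; hence r = true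
      have hbf : b = false := by cases b <;> simp_all
      have hbt : pvIsBt l = false := by cases h : pvIsBt l <;> simp_all
      have hr : r = true := hbr.resolve_left (by simp [hbf])
      have h := ih bt (reg ++ [l]) false true (Or.inr rfl)
      simp only [List.foldl_cons, pvStepA, hbt, hbf, hr, pvRun, Bool.false_or]
      simp at h ⊢
      exact ⟨h.1, h.2⟩

lemma pvFold_init (ls : List String) :
    (List.foldl pvStepA ([], [], false, false) ls).1
      = (pvRun true (ls.dropWhile (fun l => !(pvIsBt l)))).1 ∧
    (List.foldl pvStepA ([], [], false, false) ls).2.1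
      = (pvRun true (ls.dropWhile (fun l => !(pvIsBt l)))).2 := by
  induction ls with
  | nil => simp [pvRun]
  | cons l ls ih =>
    by_cases hbt : pvIsBt l = true
    · simp only [List.dropWhile_cons, hbt, Bool.not_true, if_false, reduceIte]
      by_cases hm : pvIsMark l = true
      · have h := pvFold_run ls [] [] false true (Or.inr rfl)
        simp only [List.foldl_cons, pvStepA, hbt, hm, if_true, if_pos rfl]
        simpa [pvRun, hbt, hm] using h
      · have h := pvFold_run ls [l] ([] : List String) true false (Or.inl rfl)
        simp only [List.foldl_cons, pvStepA, hbt, hm, if_true, if_pos rfl]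
        simp only [Bool.not_eq_true] at hm
        simpa [pvRun, hbt, hm] using h
    · have hbt' : pvIsBt l = false := by cases h : pvIsBt l <;> simp_all
      simp only [List.dropWhile_cons, hbt', Bool.not_false, if_true, List.foldl_cons, pvStepA,
        reduceIte]
      simpa [hbt'] using ih

-- segmentation fold: invariant form
lemma pvAppendLast_eq (acc : List (List String)) (cur : List String) (l : String) :
    pvAppendLast (acc ++ [cur]) l = acc ++ [cur ++ [l]] := by
  induction acc with
  | nil => rfl
  | cons s acc ih =>
    cases acc with
    | nil => rfl
    | cons t r => simpa [pvAppendLast] using ih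

lemma pvSeg_fold (ls : List String) : ∀ (acc : List (List String)) (cur : List String),
    List.foldl pvAddLine (acc ++ [cur]) ls
      = acc ++ (cur ++ ls.takeWhile (fun x => !(pvIsBt x)))
          :: pvSegs (ls.dropWhile (fun x => !(pvIsBt x))) := by
  induction ls with
  | nil => intro acc cur; simp [pvSegs]
  | cons l ls ih =>
    intro acc cur
    by_cases hbt : pvIsBt l = true
    · have : pvAddLine (acc ++ [cur]) l = (acc ++ [cur]) ++ [[l]] := by
        simp [pvAddLine, hbt]
      simp only [List.foldl_cons, this]
      rw [ih (acc ++ [cur]) [l]]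
      simp [hbt, pvSegs, List.takeWhile_cons, List.dropWhile_cons]
    · have hbt' : pvIsBt l = false := by cases h : pvIsBt l <;> simp_all
      have : pvAddLine (acc ++ [cur]) l = acc ++ [cur ++ [l]] := by
        simp [pvAddLine, hbt', pvAppendLast_eq]
      simp only [List.foldl_cons, this]
      rw [ih acc (cur ++ [l])]
      simp [hbt', List.takeWhile_cons, List.dropWhile_cons]

lemma pvSeg_of_tail (ls : List String)
    (h : ls = [] ∨ ∃ l ls', ls = l :: ls' ∧ pvIsBt l = true) :
    List.foldl pvAddLine [] ls = pvSegs ls := by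
  rcases h with h | ⟨l, ls', rfl, hbt⟩
  · simp [h, pvSegs]
  · have h0 : pvAddLine [] l = [] ++ [[l]] := by simp [pvAddLine]
    simp only [List.foldl_cons, h0]
    rw [pvSeg_fold ls' [] [l]]
    simp [pvSegs]

-- take/drop at the first-marker index
lemma pvTakeDrop (p : String → Bool) (s : List String) :
    s.take (s.takeWhile p).length = s.takeWhile p ∧
    s.drop ((s.takeWhile p).length + 1) = (s.dropWhile p).drop 1 := by
  induction s with
  | nil => simp
  | cons x s ih =>
    by_cases hp : p x = true
    · simpa [List.takeWhile_cons, List.dropWhile_cons, hp] using ih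
    · have hp' : p x = false := by cases h : p x <;> simp_all
      simp [List.takeWhile_cons, List.dropWhile_cons, hp']

-- pvRun jumps back to bt mode at a '#0 ' head
lemma pvRun_false_bt (d : List String)
    (h : d = [] ∨ ∃ l ls', d = l :: ls' ∧ pvIsBt l = true) :
    pvRun false d = pvRun true d := by
  rcases h with rfl | ⟨l, ls', rfl, hbt⟩
  · rfl
  · simp [pvRun, hbt]

-- regs mode over a marker-free-of-'#0 ' chunk appends the chunk to reg
lemma pvRun_false_chunk (t : List String) (ht : ∀ x ∈ t, pvIsBt x = false)
    (d : List String) (h : d = [] ∨ ∃ l ls', d = l :: ls' ∧ pvIsBt l = true) :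
    pvRun false (t ++ d) = ((pvRun true d).1, t ++ (pvRun true d).2) := by
  induction t with
  | nil => simpa using pvRun_false_bt d h
  | cons x t ih =>
    have hx : pvIsBt x = false := ht x (by simp)
    have ih' := ih (fun y hy => ht y (by simp [hy]))
    simp [pvRun, hx, ih']

-- bt mode over a '#0 '-free chunk: split at the first marker
lemma pvRun_true_chunk (t : List String) (ht : ∀ x ∈ t, pvIsBt x = false)
    (d : List String) (h : d = [] ∨ ∃ l ls', d = l :: ls' ∧ pvIsBt l = true) :
    pvRun true (t ++ d)
      = (t.takeWhile (fun l => !(pvIsMark l)) ++ (pvRun true d).1,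
         (t.dropWhile (fun l => !(pvIsMark l))).drop 1 ++ (pvRun true d).2) := by
  induction t with
  | nil => simp
  | cons x t ih =>
    have ih' := ih (fun y hy => ht y (by simp [hy]))
    by_cases hm : pvIsMark x = true
    · have := pvRun_false_chunk t (fun y hy => ht y (by simp [hy])) d h
      simp [pvRun, hm, this, List.takeWhile_cons, List.dropWhile_cons]
    · have hm' : pvIsMark x = false := by cases h : pvIsMark x <;> simp_all
      simp [pvRun, hm', ih', List.takeWhile_cons, List.dropWhile_cons]

lemma pvDrop_spec (ls : List String) :
    ls.dropWhile (fun l => !(pvIsBt l)) = [] ∨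
      ∃ l ls', ls.dropWhile (fun l => !(pvIsBt l)) = l :: ls' ∧ pvIsBt l = true := by
  induction ls with
  | nil => exact Or.inl rfl
  | cons x ls ih =>
    by_cases hx : pvIsBt x = true
    · exact Or.inr ⟨x, ls, by simp [List.dropWhile_cons, hx], hx⟩
    · have hx' : pvIsBt x = false := by cases h : pvIsBt x <;> simp_all
      simpa [List.dropWhile_cons, hx'] using ih

-- fold over the segments computes pvRun true
lemma pvSegs_fold_run (n : Nat) : ∀ (ls : List String), ls.length ≤ n →
    (ls = [] ∨ ∃ l ls', ls = l :: ls' ∧ pvIsBt l = true) →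
    ∀ (bt reg : List String),
      List.foldl pvSegStep (bt, reg) (pvSegs ls)
        = (bt ++ (pvRun true ls).1, reg ++ (pvRun true ls).2) := by
  induction n with
  | zero =>
    intro ls hlen h bt reg
    have : ls = [] := List.length_eq_zero_iff.mp (Nat.le_zero.mp hlen)
    simp [this, pvSegs, pvRun]
  | succ n ih =>
    intro ls hlen h bt reg
    rcases h with rfl | ⟨l, ls', rfl, hbt⟩
    · simp [pvSegs, pvRun]
    · set t := ls'.takeWhile (fun x => !(pvIsBt x)) with ht
      set d := ls'.dropWhile (fun x => !(pvIsBt x)) with hd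
      have htd : ls' = t ++ d := (List.takeWhile_append_dropWhile).symm
      have htfree : ∀ x ∈ t, pvIsBt x = false := by
        intro x hx
        have := List.mem_takeWhile_imp (ht ▸ hx)
        simpa using this
      have hdspec := pvDrop_spec ls'
      rw [pvSegs]
      simp only [List.foldl_cons]
      have hstep : pvSegStep (bt, reg) (l :: t)
          = (bt ++ (l :: t).takeWhile (fun x => !(pvIsMark x)),
             reg ++ ((l :: t).dropWhile (fun x => !(pvIsMark x))).drop 1) := by
        have hk := pvTakeDrop (fun l => !(pvIsMark l)) (l :: t)
        simp only [pvSegStep]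
        rw [hk.1, hk.2]
      have hdlen : d.length ≤ n := by
        have h1 : d.length ≤ ls'.length := List.length_dropWhile_le _ _
        have h2 : ls'.length ≤ n := by simpa using Nat.lt_succ_iff.mp (by simpa using hlen)
        omega
      have hrec := ih d hdlen hdspec
      rw [hstep, hrec]
      -- compare with pvRun true (l :: (t ++ d))
      rw [show pvRun true (l :: ls') = pvRun true (l :: (t ++ d)) by rw [← htd]]
      have e1 : pvRun true (l :: (t ++ d))
          = if pvIsMark l then pvRun false (t ++ d)
            else ((l :: (pvRun true (t ++ d)).1), (pvRun true (t ++ d)).2) := by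
        simp [pvRun]
      by_cases hm : pvIsMark l = true
      · have hfc := pvRun_false_chunk t htfree d hdspec
        rw [e1, if_pos hm, hfc]
        simp [List.takeWhile_cons, List.dropWhile_cons, hm]
      · have hm' : pvIsMark l = false := by revert hm; cases pvIsMark l <;> simp
        have htc := pvRun_true_chunk t htfree d hdspec
        rw [e1, if_neg (by simp [hm']), htc]
        simp [List.takeWhile_cons, List.dropWhile_cons, hm']

-- ===== VERDICT (by name: the statement is the Claim_ definition above) =====
theorem parse_gdb_output_py_spec : Claim_equal_parse_gdb_output_py := by
  intro gdb_output _
  unfold Spec_parse_gdb_output_py parse_gdb_output_py parse_gdb_output_py_alt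
  have hA := pvFold_init (PySem.Str.splitlines gdb_output)
  have hseg := pvSeg_of_tail ((PySem.Str.splitlines gdb_output).dropWhile (fun l => !(pvIsBt l)))
    (pvDrop_spec (PySem.Str.splitlines gdb_output))
  have hB := pvSegs_fold_run
    ((PySem.Str.splitlines gdb_output).dropWhile (fun l => !(pvIsBt l))).length
    ((PySem.Str.splitlines gdb_output).dropWhile (fun l => !(pvIsBt l)))
    (le_refl _) (pvDrop_spec (PySem.Str.splitlines gdb_output)) [] []
  simp only
  rw [hA.1, hA.2, hseg, hB]
  simp only [List.nil_append]
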